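-- pv_equiv track=rewrite | github.com/SusannaArun/ALPR_UNET | alpr_dataloader.py | __adjust_label
-- ===== SOURCE A (Python) =====
-- def __adjust_label(plate, left, top):
--
--     buffer = plate
--     for x in range(0, len(buffer)):
--         if (x%2==0):
--             buffer[x] = buffer[x]-left
--         else:
--             buffer[x] = buffer[x]-top
--
--     return buffer
-- ===== SOURCE B (Python) =====
-- def __adjust_label(plate, left, top):
--     # Two strided in-place slice assignments instead of an indexed loop with a parity branch.
--     plate[0::2] = [v - left for v in plate[0::2]]
--     plate[1::2] = [v - top for v in plate[1::2]]
--     return plate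
-- ===== Notes on version B (the rewrite author's own statement) =====
-- stated objective: idiomatic
-- what changed: Replaces the indexed loop with a per-element parity branch by two strided slice assignments (plate[0::2] and plate[1::2]), each a branch-free pass; mutation of the argument is preserved.
import Mathlib
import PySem

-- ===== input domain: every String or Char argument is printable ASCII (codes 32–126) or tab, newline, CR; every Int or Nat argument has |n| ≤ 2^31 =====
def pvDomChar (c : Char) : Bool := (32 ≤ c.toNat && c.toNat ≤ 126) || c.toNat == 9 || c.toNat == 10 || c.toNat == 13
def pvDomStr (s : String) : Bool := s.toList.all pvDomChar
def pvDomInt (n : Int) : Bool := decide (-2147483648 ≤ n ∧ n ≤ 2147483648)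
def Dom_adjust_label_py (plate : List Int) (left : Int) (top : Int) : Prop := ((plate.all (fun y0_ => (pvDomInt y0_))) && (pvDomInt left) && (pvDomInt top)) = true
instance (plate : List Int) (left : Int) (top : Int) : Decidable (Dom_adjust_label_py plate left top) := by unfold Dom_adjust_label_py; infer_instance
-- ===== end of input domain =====

-- B replaces the indexed loop with a parity branch by two strided slice passes; both mutate the
-- argument in place in Python (equivalence proved about the return value).

-- ===== PORT A =====
-- for x in range(0, len(buffer)): buffer[x] = buffer[x] - (left|top) by parity of x
def adjust_label_py (plate : List Int) (left : Int) (top : Int) : List Int :=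
  (PySem.List.pyRange 0 plate.length 1).foldl
    (fun buffer x =>
      if x % 2 == 0 then
        PySem.List.pySetD buffer x (PySem.List.pyGetD buffer x 0 - left)
      else
        PySem.List.pySetD buffer x (PySem.List.pyGetD buffer x 0 - top))
    plate

-- ===== PORT B =====
-- plate[0::2] (elements at even indices); plate[1::2] is pvStride2 (plate.drop 1)
def pvStride2 : List Int → List Int
  | [] => []
  | a :: rest => a :: pvStride2 (rest.drop 1)
termination_by l => l.length
decreasing_by simp

-- reassembles the list from the two slice assignments (the in-place effect of the Python slices)
def pvInterleave : List Int → List Int → List Int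
  | [], ys => ys
  | x :: xs, ys => x :: pvInterleave ys xs
termination_by xs ys => xs.length + ys.length
decreasing_by simp; omega

def adjust_label_py_alt (plate : List Int) (left : Int) (top : Int) : List Int :=
  pvInterleave ((pvStride2 plate).map (fun v => v - left))
               ((pvStride2 (plate.drop 1)).map (fun v => v - top))

-- ===== PRECONDITION & SPEC =====
def Spec_adjust_label_py (plate : List Int) (left : Int) (top : Int) (out : List Int) : Prop := out = adjust_label_py_alt plate left top
instance (plate : List Int) (left : Int) (top : Int) (out : List Int) : Decidable (Spec_adjust_label_py plate left top out) := by unfold Spec_adjust_label_py; infer_instance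

-- ===== CLAIM (what is proved, stated in full; the proofs are below) =====
def Claim_equal_adjust_label_py : Prop := ∀ (plate : List Int) (left : Int) (top : Int), Dom_adjust_label_py plate left top → Spec_adjust_label_py plate left top (adjust_label_py plate left top)

-- ===== LEMMAS AND PROOFS =====

-- reference function both ports are reduced to
def pvTr (l t : Int) : List Int → List Int
  | [] => []
  | [a] => [a - l]
  | a :: b :: rest => (a - l) :: (b - t) :: pvTr l t rest

theorem pvTr_length (l t : Int) (xs : List Int) : (pvTr l t xs).length = xs.length := by
  induction xs using pvTr.induct <;> simp [pvTr, *]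

theorem pvTr_snoc (l t : Int) (xs : List Int) (a : Int) :
    pvTr l t (xs ++ [a]) = pvTr l t xs ++ [if xs.length % 2 = 0 then a - l else a - t] := by
  induction xs using pvTr.induct with
  | case1 => simp [pvTr]
  | case2 b => simp [pvTr]
  | case3 b c rest ih =>
      simp only [List.cons_append, pvTr, ih, List.length_cons]
      have : (rest.length + 1 + 1) % 2 = rest.length % 2 := by omega
      simp [this]

theorem alt_eq_pvTr (l t : Int) (xs : List Int) :
    adjust_label_py_alt xs l t = pvTr l t xs := by
  induction xs using pvTr.induct with
  | case1 => simp [adjust_label_py_alt, pvStride2, pvInterleave, pvTr]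
  | case2 a => simp [adjust_label_py_alt, pvStride2, pvInterleave, pvTr]
  | case3 a b rest ih =>
      simpa [adjust_label_py_alt, pvStride2, pvInterleave, pvTr] using ih

theorem loopA (l t : Int) (buf : List Int) (n : Nat) (h : n ≤ buf.length) :
    (PySem.List.pyRange 0 n 1).foldl
      (fun buffer x =>
        if x % 2 == 0 then
          PySem.List.pySetD buffer x (PySem.List.pyGetD buffer x 0 - l)
        else
          PySem.List.pySetD buffer x (PySem.List.pyGetD buffer x 0 - t))
      buf = pvTr l t (buf.take n) ++ buf.drop n := by
  induction n with
  | zero => simp [PySem.List.pyRange_one_eq_nil, pvTr]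
  | succ n ih =>
      have hn : n < buf.length := by omega
      have hsplit : PySem.List.pyRange 0 (↑(n + 1)) 1 =
          PySem.List.pyRange 0 (↑n) 1 ++ [(n : Int)] := by
        have := PySem.List.pyRange_one_succ_right (a := 0) (b := (n : Int)) (by positivity)
        simpa [Nat.cast_add] using this
      rw [hsplit, List.foldl_append, ih (by omega)]
      have hlenT : (pvTr l t (buf.take n)).length = n := by
        simp [pvTr_length]; omega
      have hdrop : buf.drop n = buf[n] :: buf.drop (n + 1) :=
        List.drop_eq_getElem_cons hn
      have hget : PySem.List.pyGetD (pvTr l t (buf.take n) ++ buf.drop n) (↑n) 0 = buf[n] := by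
        rw [PySem.List.pyGetD_natCast, List.getD_eq_getElem?_getD,
            List.getElem?_append_right (by omega), hlenT]
        simp [List.getElem?_eq_getElem hn]
      have hset : ∀ v, PySem.List.pySetD (pvTr l t (buf.take n) ++ buf.drop n) (↑n) v =
          pvTr l t (buf.take n) ++ v :: buf.drop (n + 1) := by
        intro v
        rw [PySem.List.pySetD_natCast, List.set_append, if_neg (by omega), hlenT,
            Nat.sub_self, hdrop, List.set_cons_zero]
      have htake : buf.take (n + 1) = buf.take n ++ [buf[n]] := by
        rw [List.take_add_one, List.getElem?_eq_getElem hn]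
        rfl
      have hlen_take : (buf.take n).length = n := by
        simp [List.length_take]; omega
      have hmod : ((n : Int) % 2 == 0) = decide (n % 2 = 0) := by
        by_cases hp : n % 2 = 0
        · have h0 : (n : Int) % 2 = 0 := by omega
          simp [h0, hp]
        · have h0 : ¬ ((n : Int) % 2 = 0) := by omega
          simp [h0, hp]
      simp only [List.foldl_cons, List.foldl_nil]
      by_cases hp : n % 2 = 0
      · have hc : ((n : Int) % 2 == 0) = true := by rw [hmod]; simp [hp]
        rw [hc, if_pos rfl, hget, hset, htake, pvTr_snoc, hlen_take, if_pos hp,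
            List.append_assoc]
        rfl
      · have hc : ((n : Int) % 2 == 0) = false := by rw [hmod]; simp [hp]
        rw [hc, if_neg (by simp), hget, hset, htake, pvTr_snoc, hlen_take, if_neg hp,
            List.append_assoc]
        rfl

theorem a_eq_pvTr (l t : Int) (xs : List Int) :
    adjust_label_py xs l t = pvTr l t xs := by
  have := loopA l t xs xs.length le_rfl
  simpa [adjust_label_py] using this

-- ===== VERDICT (by name: the statement is the Claim_ definition above) =====
theorem adjust_label_py_spec : Claim_equal_adjust_label_py := by
  intro plate left top _
  unfold Spec_adjust_label_py
  rw [a_eq_pvTr, alt_eq_pvTr]
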